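-- pv_equiv track=rewrite | github.com/Bhaskar-kumar-arya/OCR-Form-Validator | api/key_value_extractor.py | _clean_and_normalize_data
-- ===== SOURCE A (Python) =====
-- from typing import List, Dict, Any
--
-- KEY_TO_RULE_MAP = {
--     "first name": "name", "middle name": "name", "last name": "name", "name": "name", "full name": "name",
--     "phone": "phone", "phone number": "phone", "mobile": "phone", "contact no": "phone",
--     "email": "email", "email id": "email",
--     "address line 1": "address", "address line 2": "address", "address": "address",
--     "city": "name", "state": "name", # Cities and states are like names, no special chars
--     "pin code": "pincode",
--     "date of birth": "date", "dob": "date", "date": "date",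
--     "gender": "name",
-- }
--
-- CLEANING_RULES_FOR_VALUES = {
--     "name": "!#$*[]{}",                # Remove most symbols from names
--     "phone": "()- ",                   # Remove formatting from phone numbers
--     "email": " ",                      # Only remove spaces from emails
--     "pincode": " .-",                  # Remove spaces, dots, or hyphens from pin codes
--     "address": "!",                    # Be gentle with addresses, only remove obvious errors like '!'
--     "date": " ",                       # Only remove spaces
--     "default": "!#$*[]{}",             # A fallback rule for unknown keys
-- }
--
-- ALWAYS_STRIP_CHARS = " .:,-"
--
-- def _clean_and_normalize_data(data: Dict[str, str]) -> Dict[str, str]: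
--     """Applies context-aware cleaning rules to the final extracted data."""
--     cleaned_data = {}
--     for key, value in data.items():
--         # Clean the key: remove trailing symbols
--         cleaned_key = key.strip(ALWAYS_STRIP_CHARS)
--
--         # Determine which cleaning rule to use based on the key
--         rule_type = KEY_TO_RULE_MAP.get(cleaned_key.lower(), "default")
--
--         # Get the characters to strip for this value type
--         chars_to_strip = CLEANING_RULES_FOR_VALUES.get(rule_type, "")
--
--         # Clean the value
--         cleaned_value = value
--         # First, remove specific unwanted characters from anywhere inside the value
--         for char in chars_to_strip:
--             cleaned_value = cleaned_value.replace(char, "")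
--         # Then, strip common trailing characters from the start and end
--         cleaned_value = cleaned_value.strip(ALWAYS_STRIP_CHARS)
--
--         # A few special-case normalizations
--         if rule_type == 'email':
--             cleaned_value = cleaned_value.replace(" O ", "@").replace(" gnail ", " gmail ") # Fix common OCR errors
--
--         cleaned_data[cleaned_key] = cleaned_value
--
--     return cleaned_data
-- ===== SOURCE B (Python) =====
-- from typing import Dict
--
-- KEY_TO_RULE_MAP = {
--     "first name": "name", "middle name": "name", "last name": "name", "name": "name", "full name": "name",
--     "phone": "phone", "phone number": "phone", "mobile": "phone", "contact no": "phone",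
--     "email": "email", "email id": "email",
--     "address line 1": "address", "address line 2": "address", "address": "address",
--     "city": "name", "state": "name",
--     "pin code": "pincode",
--     "date of birth": "date", "dob": "date", "date": "date",
--     "gender": "name",
-- }
--
-- CLEANING_RULES_FOR_VALUES = {
--     "name": "!#$*[]{}",
--     "phone": "()- ",
--     "email": " ",
--     "pincode": " .-",
--     "address": "!",
--     "date": " ",
--     "default": "!#$*[]{}",
-- }
--
-- ALWAYS_STRIP_CHARS = " .:,-"
--
-- # The two-stage lookup (key -> rule -> chars) is flattened once at module load
-- # into a single key -> deletion-chars dict; email keys are just the two keys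
-- # whose rule is "email".
-- DELETE_FOR_KEY = {key: CLEANING_RULES_FOR_VALUES[rule] for key, rule in KEY_TO_RULE_MAP.items()}
-- DEFAULT_DELETE = CLEANING_RULES_FOR_VALUES["default"]
-- EMAIL_KEYS = ("email", "email id")
--
-- def _scrub(s, delete):
--     # One left-to-right pass doing deletion AND both-ends strip together:
--     # leading strip chars are never emitted while `kept` is empty, and strip
--     # chars after the last keeper stay in `pending`, emitted only when a
--     # later non-strip character proves they are interior.
--     kept, pending = [], []
--     for c in s:
--         if c in delete:
--             continue
--         if c in ALWAYS_STRIP_CHARS: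
--             if kept:
--                 pending.append(c)
--         else:
--             kept.extend(pending)
--             pending.clear()
--             kept.append(c)
--     return "".join(kept)
--
-- def _clean_and_normalize_data(data: Dict[str, str]) -> Dict[str, str]:
--     """Applies context-aware cleaning rules to the final extracted data."""
--     result = {}
--     for key, value in data.items():
--         cleaned_key = _scrub(key, "")
--         low = cleaned_key.lower()
--         cleaned_value = _scrub(value, DELETE_FOR_KEY.get(low, DEFAULT_DELETE))
--         if low in EMAIL_KEYS:
--             cleaned_value = cleaned_value.replace(" O ", "@").replace(" gnail ", " gmail ")
--         result[cleaned_key] = cleaned_value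
--     return result
-- ===== Notes on version B (the rewrite author's own statement) =====
-- stated objective: alternative
-- what changed: The two-stage key->rule->chars lookup is flattened at module load into one key->deletion-chars dict, and A's staged value pipeline (one full .replace scan per deletion character, then a separate both-ends strip) is replaced by a single left-to-right pass with a pending buffer that deletes and strips in one traversal.
import Mathlib
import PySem

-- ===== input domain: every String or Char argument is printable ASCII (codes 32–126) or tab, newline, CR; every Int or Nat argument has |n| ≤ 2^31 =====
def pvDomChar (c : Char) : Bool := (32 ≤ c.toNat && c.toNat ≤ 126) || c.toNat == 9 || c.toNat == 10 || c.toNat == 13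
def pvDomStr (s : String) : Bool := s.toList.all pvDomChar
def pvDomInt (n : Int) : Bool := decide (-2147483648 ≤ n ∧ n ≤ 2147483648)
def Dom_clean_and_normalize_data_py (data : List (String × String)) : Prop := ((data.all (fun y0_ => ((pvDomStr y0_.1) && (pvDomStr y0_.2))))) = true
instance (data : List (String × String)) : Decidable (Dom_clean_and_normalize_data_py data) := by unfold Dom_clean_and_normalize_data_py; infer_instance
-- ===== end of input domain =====

-- B flattens the two-stage rule lookup into one key→deletion-chars dict built at module
-- load, and replaces A's staged value pipeline (k full .replace scans, then a separate
-- two-ended strip) by ONE left-to-right pass with a pending buffer that deletes and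
-- strips simultaneously (objective: alternative).

-- module-level constants shared by both Pythons
def pvKeyToRuleMap : PySem.Dict String String := PySem.Dict.ofList
  [("first name", "name"), ("middle name", "name"), ("last name", "name"), ("name", "name"), ("full name", "name"),
   ("phone", "phone"), ("phone number", "phone"), ("mobile", "phone"), ("contact no", "phone"),
   ("email", "email"), ("email id", "email"),
   ("address line 1", "address"), ("address line 2", "address"), ("address", "address"),
   ("city", "name"), ("state", "name"),
   ("pin code", "pincode"),
   ("date of birth", "date"), ("dob", "date"), ("date", "date"),
   ("gender", "name")]

def pvCleaningRules : PySem.Dict String String := PySem.Dict.ofList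
  [("name", "!#$*[]{}"), ("phone", "()- "), ("email", " "), ("pincode", " .-"),
   ("address", "!"), ("date", " "), ("default", "!#$*[]{}")]

def pvAlwaysStrip : String := " .:,-"

-- ===== PORT A =====
def clean_and_normalize_data_py (data : List (String × String)) : List (String × String) :=
  (data.foldl (fun cleaned_data kv =>
      let cleaned_key := PySem.Str.stripChars kv.1 pvAlwaysStrip
      let rule_type := pvKeyToRuleMap.getD (PySem.Str.lower cleaned_key) "default"
      let chars_to_strip := pvCleaningRules.getD rule_type ""
      -- for char in chars_to_strip: cleaned_value = cleaned_value.replace(char, "")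
      let cleaned_value := chars_to_strip.toList.foldl
        (fun v ch => PySem.Str.replace v (String.ofList [ch]) "") kv.2
      let cleaned_value := PySem.Str.stripChars cleaned_value pvAlwaysStrip
      let cleaned_value :=
        if rule_type == "email" then
          PySem.Str.replace (PySem.Str.replace cleaned_value " O " "@") " gnail " " gmail "
        else cleaned_value
      cleaned_data.insert cleaned_key cleaned_value)
    PySem.Dict.empty).items

-- ===== PORT B =====
-- DELETE_FOR_KEY = {key: CLEANING_RULES_FOR_VALUES[rule] for key, rule in KEY_TO_RULE_MAP.items()}
def pvDeleteForKey : PySem.Dict String String :=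
  PySem.Dict.ofList (pvKeyToRuleMap.items.map (fun kr => (kr.1, pvCleaningRules.getD kr.2 "")))

def pvDefaultDelete : String := pvCleaningRules.getD "default" ""

-- body of _scrub's loop: delete, drop leading strip chars, buffer possible trailing ones
def pvScrubStep (delete : List Char) (acc : List Char × List Char) (c : Char) : List Char × List Char :=
  if delete.contains c then acc
  else if pvAlwaysStrip.toList.contains c then
    (if acc.1.isEmpty then acc else (acc.1, acc.2 ++ [c]))
  else (acc.1 ++ acc.2 ++ [c], [])

def pvScrub (s delete : String) : String :=
  String.ofList (s.toList.foldl (pvScrubStep delete.toList) ([], [])).1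

def clean_and_normalize_data_py_alt (data : List (String × String)) : List (String × String) :=
  (data.foldl (fun result kv =>
      let cleaned_key := pvScrub kv.1 ""
      let low := PySem.Str.lower cleaned_key
      let cleaned_value := pvScrub kv.2 (pvDeleteForKey.getD low pvDefaultDelete)
      let cleaned_value :=
        if low == "email" || low == "email id" then
          PySem.Str.replace (PySem.Str.replace cleaned_value " O " "@") " gnail " " gmail "
        else cleaned_value
      result.insert cleaned_key cleaned_value)
    PySem.Dict.empty).items

-- ===== PRECONDITION & SPEC =====
def Spec_clean_and_normalize_data_py (data : List (String × String)) (out : List (String × String)) : Prop := out = clean_and_normalize_data_py_alt data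
instance (data : List (String × String)) (out : List (String × String)) : Decidable (Spec_clean_and_normalize_data_py data out) := by unfold Spec_clean_and_normalize_data_py; infer_instance

-- ===== CLAIM =====
def Claim_equal_clean_and_normalize_data_py : Prop := ∀ (data : List (String × String)), Dom_clean_and_normalize_data_py data → Spec_clean_and_normalize_data_py data (clean_and_normalize_data_py data)

-- ===== LEMMAS AND PROOFS =====

-- replace.go with a single-char pattern and empty replacement is a filter
theorem pv_go_filter (c : Char) : ∀ (fuel : Nat) (l acc : List Char), l.length ≤ fuel →
    PySem.Chars.replace.go [c] [] fuel l acc = acc.reverse ++ l.filter (fun x => !(x == c)) := by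
  intro fuel
  induction fuel with
  | zero =>
    intro l acc h
    have : l = [] := List.length_eq_zero_iff.mp (Nat.le_zero.mp h)
    subst this; simp [PySem.Chars.replace.go]
  | succ n ih =>
    intro l acc h
    cases l with
    | nil => simp [PySem.Chars.replace.go]
    | cons a t =>
      simp only [PySem.Chars.replace.go]
      by_cases hac : a = c
      · subst hac
        rw [if_pos (by simp [List.isPrefixOf])]
        rw [ih _ _ (by simpa using Nat.le_of_succ_le_succ h)]
        simp
      · rw [if_neg (by simp [List.isPrefixOf]; exact fun h' => hac h'.symm)]
        rw [ih _ _ (by simpa using Nat.le_of_succ_le_succ h)]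
        simp [hac]

theorem pv_replace_single (s : List Char) (c : Char) :
    PySem.Chars.replace s [c] [] = s.filter (fun x => !(x == c)) := by
  rw [PySem.Chars.replace, if_neg (by simp)]
  exact pv_go_filter c s.length s [] (le_refl _)

-- folding single-character deletions over cs removes every character of cs
theorem pv_fold_replace_filter (cs : List Char) : ∀ (v : String),
    (cs.foldl (fun v ch => PySem.Str.replace v (String.ofList [ch]) "") v).toList
      = v.toList.filter (fun x => !(cs.contains x)) := by
  induction cs with
  | nil => intro v; simp
  | cons c t ih =>
    intro v
    simp only [List.foldl_cons]
    rw [ih]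
    simp only [PySem.Str.toList_replace, String.toList_ofList]
    have h0 : ("" : String).toList = [] := rfl
    rw [h0, pv_replace_single, List.filter_filter]
    apply List.filter_congr
    intro x _
    by_cases hxc : x = c <;> simp [hxc, Bool.and_comm]

-- the right-strip of g, then the dropped trailing part, reassemble to g
theorem pv_rstrip_decomp (p : Char → Bool) (g : List Char) :
    (List.dropWhile p g.reverse).reverse
      ++ g.drop (List.dropWhile p g.reverse).reverse.length = g := by
  set D : List Char := (List.dropWhile p g.reverse).reverse with hD
  set T : List Char := (List.takeWhile p g.reverse).reverse with hT
  have h : g = D ++ T := by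
    rw [hD, hT, ← List.reverse_append, List.takeWhile_append_dropWhile, List.reverse_reverse]
  conv_lhs => rw [h]
  conv_rhs => rw [h]
  rw [List.drop_left]

-- _scrub's single pass computes strip(filter): loop invariant over the traversed prefix
theorem pv_scrub_fold (del : List Char) (l : List Char) :
    l.foldl (pvScrubStep del) ([], []) =
      (PySem.Chars.stripChars (l.filter (fun c => !(del.contains c))) pvAlwaysStrip.toList,
       (List.dropWhile (fun c => pvAlwaysStrip.toList.contains c)
          (l.filter (fun c => !(del.contains c)))).drop
         (PySem.Chars.stripChars (l.filter (fun c => !(del.contains c))) pvAlwaysStrip.toList).length) := by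
  induction l using List.reverseRecOn with
  | nil => simp [PySem.Chars.stripChars]
  | append_singleton l c ih =>
    rw [List.foldl_append, List.foldl_cons, List.foldl_nil, ih]
    set p : Char → Bool := fun c => pvAlwaysStrip.toList.contains c with hp
    set f : List Char := l.filter (fun c => !(del.contains c)) with hf
    by_cases hdel : del.contains c = true
    · -- deleted: filter unchanged
      have hmem : c ∈ del := by simpa using hdel
      have hfil : (l ++ [c]).filter (fun c => !(del.contains c)) = f := by
        rw [List.filter_append, hf]; simp [hmem]
      rw [hfil]
      unfold pvScrubStep
      rw [if_pos hdel]
    · have hnmem : c ∉ del := by simpa using hdel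
      have hfil : (l ++ [c]).filter (fun c => !(del.contains c)) = f ++ [c] := by
        rw [List.filter_append, hf]; simp [hnmem]
      rw [hfil]
      set g : List Char := List.dropWhile p f with hg
      have hstrip : PySem.Chars.stripChars f pvAlwaysStrip.toList
          = (List.dropWhile p g.reverse).reverse := by
        simp [PySem.Chars.stripChars, hg, hp]
      have hstrip2 : PySem.Chars.stripChars (f ++ [c]) pvAlwaysStrip.toList
          = (List.dropWhile p (List.dropWhile p (f ++ [c])).reverse).reverse := by
        simp [PySem.Chars.stripChars, hp]
      by_cases hc : p c = true
      · -- strip char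
        have hg' : List.dropWhile p (f ++ [c]) = if g.isEmpty then [] else g ++ [c] := by
          rw [List.dropWhile_append]
          by_cases he : g.isEmpty <;> simp [← hg, he, List.dropWhile, hc]
        by_cases he : g = []
        · -- everything so far strippable: state is ([], [])
          have hc0 : PySem.Chars.stripChars f pvAlwaysStrip.toList = [] := by
            rw [hstrip, he]; simp
          have hc1 : PySem.Chars.stripChars (f ++ [c]) pvAlwaysStrip.toList = [] := by
            rw [hstrip2, hg']; simp [he]
          unfold pvScrubStep
          rw [if_neg hdel, if_pos hc, hc0, hc1, hg']
          simp [he]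
        · -- pending grows by c; stripped part unchanged
          have hgne : g ≠ [] := he
          have hhead : ¬ p (g.head hgne) = true := by
            have := List.head_dropWhile_not p (l := f) (w := hg ▸ hgne)
            simp_all
          have hr_ne : PySem.Chars.stripChars f pvAlwaysStrip.toList ≠ [] := by
            rw [hstrip]
            intro hcon
            have hnil : List.dropWhile p g.reverse = [] := by
              simpa using congrArg List.reverse hcon
            have hall := List.dropWhile_eq_nil_iff.mp hnil
            exact hhead (hall _ (by simp [List.head_mem]))
          have hstrip' : PySem.Chars.stripChars (f ++ [c]) pvAlwaysStrip.toList
              = PySem.Chars.stripChars f pvAlwaysStrip.toList := by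
            rw [hstrip2, hstrip, hg', if_neg (by simpa using he)]
            simp [hc]
          have hlen : (PySem.Chars.stripChars f pvAlwaysStrip.toList).length ≤ g.length := by
            rw [hstrip]
            simpa using (List.length_dropWhile_le p g.reverse)
          unfold pvScrubStep
          rw [if_neg hdel, if_pos hc, if_neg (by simpa using hr_ne)]
          rw [hstrip', hg', if_neg (by simpa using he)]
          rw [List.drop_append_of_le_length hlen]
      · -- keeper char: everything pending is flushed
        have hg' : List.dropWhile p (f ++ [c]) = g ++ [c] := by
          rw [List.dropWhile_append]
          by_cases he : g.isEmpty
          · simp [← hg, List.isEmpty_iff.mp he, hc]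
          · simp [← hg, he]
        have hstrip' : PySem.Chars.stripChars (f ++ [c]) pvAlwaysStrip.toList = g ++ [c] := by
          rw [hstrip2, hg']
          simp [hc]
        have hcat : PySem.Chars.stripChars f pvAlwaysStrip.toList
            ++ g.drop (PySem.Chars.stripChars f pvAlwaysStrip.toList).length = g := by
          rw [hstrip]
          exact pv_rstrip_decomp p g
        unfold pvScrubStep
        rw [if_neg hdel, if_neg hc, hstrip', hg']
        dsimp only
        rw [hcat, List.drop_length]

theorem pv_scrub_eq (s delete : String) :
    pvScrub s delete
      = PySem.Str.stripChars
          (String.ofList (s.toList.filter (fun c => !(delete.toList.contains c)))) pvAlwaysStrip := by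
  unfold pvScrub
  rw [pv_scrub_fold]
  simp [PySem.Str.stripChars]

-- the flattened dict yields the same deletion characters as A's two-stage lookup
theorem pv_lookup_eq (k : String) :
    pvDeleteForKey.getD k pvDefaultDelete
      = pvCleaningRules.getD (pvKeyToRuleMap.getD k "default") "" := by
  rcases hq : pvKeyToRuleMap.get? k with _ | v
  · have hk : ¬ k ∈ pvKeyToRuleMap.keys := (PySem.Dict.get?_eq_none_iff_not_mem_keys _ _).mp hq
    have hkeys : pvKeyToRuleMap.keys = pvDeleteForKey.keys := by decide
    have hq2 : pvDeleteForKey.get? k = none :=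
      (PySem.Dict.get?_eq_none_iff_not_mem_keys _ _).mpr (hkeys ▸ hk)
    simp only [PySem.Dict.getD_eq_get?_getD, hq, hq2, Option.getD_none]
    decide
  · have hm : (k, v) ∈ pvKeyToRuleMap.items := PySem.Dict.mem_items_of_get?_eq_some _ hq
    have hitems : pvKeyToRuleMap.items =
      [("first name", "name"), ("middle name", "name"), ("last name", "name"), ("name", "name"), ("full name", "name"),
       ("phone", "phone"), ("phone number", "phone"), ("mobile", "phone"), ("contact no", "phone"),
       ("email", "email"), ("email id", "email"),
       ("address line 1", "address"), ("address line 2", "address"), ("address", "address"),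
       ("city", "name"), ("state", "name"),
       ("pin code", "pincode"),
       ("date of birth", "date"), ("dob", "date"), ("date", "date"),
       ("gender", "name")] := by decide
    rw [hitems] at hm
    simp only [PySem.Dict.getD_eq_get?_getD, hq, Option.getD_some]
    fin_cases hm <;> decide

-- B's email-key test agrees with A's rule test
theorem pv_email_eq (k : String) :
    (k == "email" || k == "email id") = (pvKeyToRuleMap.getD k "default" == "email") := by
  rcases hq : pvKeyToRuleMap.get? k with _ | v
  · have hk1 : k ≠ "email" := by intro e; subst e; revert hq; decide
    have hk2 : k ≠ "email id" := by intro e; subst e; revert hq; decide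
    simp only [PySem.Dict.getD_eq_get?_getD, hq, Option.getD_none]
    simp [hk1, hk2]
  · have hm : (k, v) ∈ pvKeyToRuleMap.items := PySem.Dict.mem_items_of_get?_eq_some _ hq
    have hitems : pvKeyToRuleMap.items =
      [("first name", "name"), ("middle name", "name"), ("last name", "name"), ("name", "name"), ("full name", "name"),
       ("phone", "phone"), ("phone number", "phone"), ("mobile", "phone"), ("contact no", "phone"),
       ("email", "email"), ("email id", "email"),
       ("address line 1", "address"), ("address line 2", "address"), ("address", "address"),
       ("city", "name"), ("state", "name"),
       ("pin code", "pincode"),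
       ("date of birth", "date"), ("dob", "date"), ("date", "date"),
       ("gender", "name")] := by decide
    rw [hitems] at hm
    simp only [PySem.Dict.getD_eq_get?_getD, hq, Option.getD_some]
    fin_cases hm <;> decide

-- single pass on the value = A's replace-fold then strip
theorem pv_value_eq (v chars : String) :
    pvScrub v chars
      = PySem.Str.stripChars
          (chars.toList.foldl (fun w ch => PySem.Str.replace w (String.ofList [ch]) "") v)
          pvAlwaysStrip := by
  rw [pv_scrub_eq]
  unfold PySem.Str.stripChars
  rw [pv_fold_replace_filter]
  simp

-- ===== VERDICT =====
theorem clean_and_normalize_data_py_spec : Claim_equal_clean_and_normalize_data_py := by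
  intro data _
  unfold Spec_clean_and_normalize_data_py clean_and_normalize_data_py clean_and_normalize_data_py_alt
  congr 1
  apply List.foldl_ext
  intro d kv _
  have hkey : pvScrub kv.1 "" = PySem.Str.stripChars kv.1 pvAlwaysStrip := by
    rw [pv_scrub_eq]; simp
  simp only [hkey, pv_lookup_eq, pv_email_eq, pv_value_eq]
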